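-- pv_equiv track=rewrite | github.com/furuhama/advent_of_code | day4/check_passphrase.py | check_valid_phrase_count
-- ===== SOURCE A (Python) =====
-- def check_valid_phrase_count(word_list):
--     """
--     check whether each passphrase has the same phrase in it
--     """
--     checked = []
--     for e in word_list:
--         if e in checked:
--             return False
--         else:
--             checked.append(e)
--
--     return True
-- ===== SOURCE B (Python) =====
-- def check_valid_phrase_count(word_list):
--     """
--     check whether each passphrase has the same phrase in it
--     """
--     words = list(word_list)
--     return len(set(words)) == len(words)
-- ===== Notes on version B (the rewrite author's own statement) =====
-- stated objective: idiomatic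
-- what changed: Replaces the incremental membership-scan loop with early return by a single cardinality comparison: materialize the words and compare len(set(words)) to len(words).
import Mathlib
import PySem

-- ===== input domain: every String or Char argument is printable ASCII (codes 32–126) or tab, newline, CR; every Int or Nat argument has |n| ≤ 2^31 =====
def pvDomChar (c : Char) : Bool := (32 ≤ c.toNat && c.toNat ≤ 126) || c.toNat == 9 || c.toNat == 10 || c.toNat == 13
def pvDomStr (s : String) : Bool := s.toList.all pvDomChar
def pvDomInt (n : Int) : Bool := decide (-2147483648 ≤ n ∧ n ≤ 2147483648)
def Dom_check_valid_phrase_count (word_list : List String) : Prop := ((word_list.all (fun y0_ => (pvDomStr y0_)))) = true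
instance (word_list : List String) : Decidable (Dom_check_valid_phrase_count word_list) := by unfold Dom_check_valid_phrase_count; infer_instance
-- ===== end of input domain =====

-- B replaces A's incremental membership-scan loop (early return on a repeat) by the
-- idiomatic cardinality comparison len(set(words)) == len(words); same return value.


-- ===== PORT A =====
-- the for-loop with accumulator `checked` and early `return False`
def pvLoopA (checked : List String) : List String → Bool
  | [] => true
  | e :: rest => if checked.contains e then false else pvLoopA (checked ++ [e]) rest

def check_valid_phrase_count (word_list : List String) : Bool :=
  pvLoopA [] word_list

-- ===== PORT B =====
def check_valid_phrase_count_alt (word_list : List String) : Bool :=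
  let words := word_list
  (PySem.Set.ofList words).length == words.length

-- ===== PRECONDITION & SPEC =====
def Spec_check_valid_phrase_count (word_list : List String) (out : Bool) : Prop := out = check_valid_phrase_count_alt word_list
instance (word_list : List String) (out : Bool) : Decidable (Spec_check_valid_phrase_count word_list out) := by unfold Spec_check_valid_phrase_count; infer_instance

-- ===== CLAIM (what is proved, stated in full; the proofs are below) =====
def Claim_equal_check_valid_phrase_count : Prop := ∀ (word_list : List String), Dom_check_valid_phrase_count word_list → Spec_check_valid_phrase_count word_list (check_valid_phrase_count word_list)

-- ===== LEMMAS AND PROOFS =====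
theorem pv_len_add_le (s : List String) (e : String) :
    (PySem.Set.add s e).length ≤ s.length + 1 := by
  unfold PySem.Set.add
  split <;> simp

theorem pv_len_foldl_add_le (l s : List String) :
    (l.foldl PySem.Set.add s).length ≤ s.length + l.length := by
  induction l generalizing s with
  | nil => simp
  | cons e rest ih =>
    simp only [List.foldl_cons, List.length_cons]
    calc (rest.foldl PySem.Set.add (PySem.Set.add s e)).length
        ≤ (PySem.Set.add s e).length + rest.length := ih _
      _ ≤ s.length + 1 + rest.length := by
          have := pv_len_add_le s e; omega
      _ = s.length + (rest.length + 1) := by omega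

theorem pv_loopA_eq (l : List String) : ∀ (s : List String),
    pvLoopA s l = ((l.foldl PySem.Set.add s).length == s.length + l.length) := by
  induction l with
  | nil => intro s; simp [pvLoopA]
  | cons e rest ih =>
    intro s
    by_cases h : s.contains e
    · have hm : e ∈ s := by simpa using h
      have hadd : PySem.Set.add s e = s := by
        unfold PySem.Set.add
        simp [PySem.Set.contains, hm]
      have hlt : (rest.foldl PySem.Set.add s).length < s.length + (rest.length + 1) := by
        have := pv_len_foldl_add_le rest s; omega
      simp only [pvLoopA, h, if_true, List.foldl_cons, hadd, List.length_cons]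
      symm
      rw [beq_eq_false_iff_ne]
      omega
    · have hm : e ∉ s := by simpa using h
      have hadd : PySem.Set.add s e = s ++ [e] := by
        unfold PySem.Set.add
        simp [PySem.Set.contains, hm]
      simp only [pvLoopA, h, List.foldl_cons, hadd, List.length_cons]
      rw [ih (s ++ [e])]
      have hlen : (s ++ [e]).length + rest.length = s.length + (rest.length + 1) := by
        simp
        omega
      rw [hlen]
      simp

-- ===== VERDICT (by name: the statement is the Claim_ definition above) =====
theorem check_valid_phrase_count_spec : Claim_equal_check_valid_phrase_count := by
  intro word_list _
  unfold Spec_check_valid_phrase_count check_valid_phrase_count check_valid_phrase_count_alt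
  rw [pv_loopA_eq]
  simp [PySem.Set.ofList_eq_foldl]
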